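-- pv_equiv track=rewrite | github.com/hladek/M-IFEval | instructions/sk_instructions.py | check_following
-- ===== SOURCE A (Python) =====
-- def check_following(value):
--   valid_responses = list()
--   responses = value.split("******")
--   for index, response in enumerate(responses):
--     if not response.strip():
--       if index != 0 and index != len(responses) - 1:
--         return False
--     else:
--       valid_responses.append(response)
--   return (
--       len(valid_responses) == 2
--       and valid_responses[0].strip() != valid_responses[1].strip()
--   )
-- ===== SOURCE B (Python) =====
-- def check_following(value):
--   responses = value.split("******")
--   if responses and not responses[0].strip():
--     responses = responses[1:]
--   if responses and not responses[-1].strip():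
--     responses = responses[:-1]
--   return (
--       len(responses) == 2
--       and all(r.strip() for r in responses)
--       and responses[0].strip() != responses[1].strip()
--   )
-- ===== Notes on version B (the rewrite author's own statement) =====
-- stated objective: simpler
-- what changed: Replaces the index-tracking accumulator loop with an early return by a direct pipeline: trim at most one blank segment off each end of the split list, then check length 2, all segments non-blank, and distinct stripped values.
import Mathlib
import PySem

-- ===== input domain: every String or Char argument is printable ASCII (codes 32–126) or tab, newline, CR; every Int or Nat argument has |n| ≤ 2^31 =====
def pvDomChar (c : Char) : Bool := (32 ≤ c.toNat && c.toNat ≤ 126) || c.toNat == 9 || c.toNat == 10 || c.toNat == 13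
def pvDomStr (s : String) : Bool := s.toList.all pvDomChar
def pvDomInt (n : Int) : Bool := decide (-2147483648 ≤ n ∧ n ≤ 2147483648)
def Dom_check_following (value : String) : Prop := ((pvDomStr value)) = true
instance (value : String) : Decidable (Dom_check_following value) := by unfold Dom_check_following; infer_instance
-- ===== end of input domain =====

-- B simplifies A's index-tracking loop into: trim one blank segment off each end, then check shape.

-- ===== PORT A =====
-- value.split("******") : sep ≠ "", so PySem.Str.split? is always some; .getD [] is exact
-- `not response.strip()` : the stripped segment is empty
def pvBlank (s : String) : Bool := PySem.Str.strip s == ""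

-- the final return expression of A (and B): len == 2 and strips differ
def pvFinish (vr : List String) : Bool :=
  vr.length == 2 && (PySem.Str.strip (vr.getD 0 "") != PySem.Str.strip (vr.getD 1 ""))

-- the for-loop of A: rem = remaining responses, idx = current index, total = len(responses), acc = valid_responses
def pvGoA (rem : List String) (idx total : Nat) (acc : List String) : Bool :=
  match rem with
  | [] => pvFinish acc
  | r :: rest =>
      if pvBlank r then
        if idx ≠ 0 ∧ idx ≠ total - 1 then false
        else pvGoA rest (idx + 1) total acc
      else pvGoA rest (idx + 1) total (acc ++ [r])

def check_following (value : String) : Bool :=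
  let responses := (PySem.Str.split? value "******").getD []
  pvGoA responses 0 responses.length []

-- ===== PORT B =====
-- `responses = responses[1:]` when the first segment is blank
def pvTrimFront (l : List String) : List String :=
  match l with
  | [] => []
  | x :: xs => if pvBlank x then xs else x :: xs

-- `responses = responses[:-1]` when the last segment is blank (responses[-1] via getLast?)
def pvTrimBack (l : List String) : List String :=
  match l.getLast? with
  | none => l
  | some x => if pvBlank x then l.dropLast else l

def check_following_alt (value : String) : Bool :=
  let responses := pvTrimBack (pvTrimFront ((PySem.Str.split? value "******").getD []))
  responses.length == 2 && responses.all (fun r => !pvBlank r) &&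
    (PySem.Str.strip (responses.getD 0 "") != PySem.Str.strip (responses.getD 1 ""))

-- ===== PRECONDITION & SPEC =====
def Spec_check_following (value : String) (out : Bool) : Prop := out = check_following_alt value
instance (value : String) (out : Bool) : Decidable (Spec_check_following value out) := by unfold Spec_check_following; infer_instance

-- ===== CLAIM (what is proved, stated in full; the proofs are below) =====
def Claim_equal_check_following : Prop := ∀ (value : String), Dom_check_following value → Spec_check_following value (check_following value)

-- ===== LEMMAS AND PROOFS =====

-- B's final check on a list
def pvCheckB (m : List String) : Bool :=
  m.length == 2 && m.all (fun r => !pvBlank r) &&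
    (PySem.Str.strip (m.getD 0 "") != PySem.Str.strip (m.getD 1 ""))

-- the behaviour of A's loop once idx ≥ 1: interior blanks return false, a blank last is skipped
def pvSpecTail (acc rem : List String) : Bool :=
  match rem with
  | [] => pvFinish acc
  | [r] => if pvBlank r then pvFinish acc else pvFinish (acc ++ [r])
  | r :: rest => if pvBlank r then false else pvSpecTail (acc ++ [r]) rest

theorem pvGoA_tail (rem : List String) : ∀ (idx total : Nat) (acc : List String),
    1 ≤ idx → total = idx + rem.length → pvGoA rem idx total acc = pvSpecTail acc rem := by
  induction rem with
  | nil => intro idx total acc h1 h2; simp [pvGoA, pvSpecTail]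
  | cons r rest ih =>
    intro idx total acc h1 h2
    match rest with
    | [] =>
      have h : ¬(idx ≠ 0 ∧ idx ≠ total - 1) := by
        simp [List.length_cons] at h2; omega
      by_cases hb : pvBlank r <;> simp [pvGoA, pvSpecTail, hb, h]
    | s :: rest' =>
      by_cases hb : pvBlank r
      · have h : idx ≠ 0 ∧ idx ≠ total - 1 := by
          simp [List.length_cons] at h2; omega
        simp [pvGoA, pvSpecTail, hb, h]
      · simp only [pvGoA, pvSpecTail, hb, Bool.false_eq_true, if_false]
        exact ih (idx + 1) total (acc ++ [r]) (by omega)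
          (by simp [List.length_cons] at h2 ⊢; omega)

theorem pvCheckB_of_blank_mem (m : List String) (x : String) (hx : x ∈ m) (hb : pvBlank x = true) :
    pvCheckB m = false := by
  have : m.all (fun r => !pvBlank r) = false := by
    simp only [List.all_eq_false]
    exact ⟨x, hx, by simp [hb]⟩
  simp [pvCheckB, this]

theorem pvAll_nonblank (acc : List String) (hacc : ∀ x ∈ acc, pvBlank x = false) :
    acc.all (fun r => !pvBlank r) = true := by
  simp [List.all_eq_true]; intro x hx; simp [hacc x hx]

theorem pvTrimBack_cons₂ (r s : String) (rest : List String) :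
    pvTrimBack (r :: s :: rest) = r :: pvTrimBack (s :: rest) := by
  unfold pvTrimBack
  have h1 : (r :: s :: rest).getLast? = (s :: rest).getLast? := by simp
  rw [h1]
  cases hy : (s :: rest).getLast? with
  | none => simp at hy
  | some y => by_cases hb : pvBlank y <;> simp [hb]

-- specTail equals B's end-trim-and-check, for an accumulator of non-blank segments
theorem pvSpecTail_eq_checkB (rem : List String) : ∀ (acc : List String),
    (∀ x ∈ acc, pvBlank x = false) → pvSpecTail acc rem = pvCheckB (acc ++ pvTrimBack rem) := by
  induction rem with
  | nil =>
    intro acc hacc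
    simp [pvSpecTail, pvTrimBack, pvCheckB, pvFinish, pvAll_nonblank acc hacc]
  | cons r rest ih =>
    intro acc hacc
    match rest with
    | [] =>
      by_cases hb : pvBlank r
      · simp [pvSpecTail, pvTrimBack, hb, pvCheckB, pvFinish, pvAll_nonblank acc hacc]
      · have hacc' : ∀ x ∈ acc ++ [r], pvBlank x = false := by
          intro x hx
          rcases List.mem_append.mp hx with h1 | h1
          · exact hacc x h1
          · simp at h1; subst h1; simpa using hb
        simp [pvSpecTail, pvTrimBack, hb, pvCheckB, pvFinish, pvAll_nonblank _ hacc']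
    | s :: rest' =>
      rw [pvTrimBack_cons₂ r s rest']
      by_cases hb : pvBlank r
      · have : pvCheckB (acc ++ r :: pvTrimBack (s :: rest')) = false :=
          pvCheckB_of_blank_mem _ r (by simp) hb
        simp [pvSpecTail, hb, this]
      · have hacc' : ∀ x ∈ acc ++ [r], pvBlank x = false := by
          intro x hx
          rcases List.mem_append.mp hx with h1 | h1
          · exact hacc x h1
          · simp at h1; subst h1; simpa using hb
        have := ih (acc ++ [r]) hacc'
        simp only [pvSpecTail, hb, Bool.false_eq_true, if_false]
        rw [this]
        simp

-- the whole thing, stated over the split result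
theorem pvMain (l : List String) : pvGoA l 0 l.length [] = pvCheckB (pvTrimBack (pvTrimFront l)) := by
  match l with
  | [] => simp [pvGoA, pvFinish, pvTrimFront, pvTrimBack, pvCheckB]
  | [x] =>
    by_cases hb : pvBlank x
    · simp [pvGoA, hb, pvFinish, pvTrimFront, pvTrimBack, pvCheckB]
    · simp [pvGoA, hb, pvFinish, pvTrimFront, pvTrimBack, pvCheckB]
  | x :: s :: rest =>
    by_cases hb : pvBlank x
    · have h1 : pvGoA (x :: s :: rest) 0 (x :: s :: rest).length [] =
          pvGoA (s :: rest) 1 (x :: s :: rest).length [] := by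
        simp [pvGoA, hb]
      rw [h1, pvGoA_tail (s :: rest) 1 _ [] (by omega) (by simp [List.length_cons]; omega),
          pvSpecTail_eq_checkB (s :: rest) [] (by simp)]
      simp [pvTrimFront, hb]
    · have h1 : pvGoA (x :: s :: rest) 0 (x :: s :: rest).length [] =
          pvGoA (s :: rest) 1 (x :: s :: rest).length [x] := by
        simp [pvGoA, hb]
      rw [h1, pvGoA_tail (s :: rest) 1 _ [x] (by omega) (by simp [List.length_cons]; omega),
          pvSpecTail_eq_checkB (s :: rest) [x] (by intro y hy; simp at hy; subst hy; simpa using hb)]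
      simp [pvTrimFront, hb, pvTrimBack_cons₂ x s rest]

-- ===== VERDICT (by name: the statement is the Claim_ definition above) =====
theorem check_following_spec : Claim_equal_check_following := by
  intro value _
  unfold Spec_check_following check_following check_following_alt
  have := pvMain ((PySem.Str.split? value "******").getD [])
  simpa [pvCheckB] using this
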